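-- pv_equiv track=rewrite | github.com/Pabitra-26/Problem-Solved | Hackerrank/Priyanka_and_Toys.py | toys
-- ===== SOURCE A (Python) =====
-- def toys(w):
--     count=0              # to count the no. of containers
--     w.sort()             # sort the given array
--     i=0                  # index values of w
--     while(i<len(w)):
--         m=w[i]           #store the initial value of a container in m
--         m+=4             # since a container can store weights upto 4 + minimum weight in that container
--         for j in w[i:]:  # use a for loop to iterate through the values in w
--             if(j<=m):
--                 i+=1    # increment the index value(as it can be stored in the same container
--             else:       # different container
--                 count+=1 #increment the no.of containers
--                 break
--     return count+1     # return count+1 to get the actual number of containers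
-- ===== SOURCE B (Python) =====
-- def toys(w):
--     # single linear pass over the sorted list, no slicing; one counter + current limit
--     count = 0
--     limit = None
--     for x in sorted(w):
--         if limit is None or x > limit:
--             count += 1
--             limit = x + 4
--     return count
-- ===== Notes on version B (the rewrite author's own statement) =====
-- stated objective: faster
-- what changed: replaces the while-loop with repeated slicing w[i:] and an inner break-loop by a single linear pass over sorted(w) keeping only a counter and the current container's limit
-- intended difference: on the empty list A returns 1 (its unconditional count+1) while B returns 0, the intended number of containers for zero toys — e.g. on toys([]): A returns 1, B returns 0
import Mathlib
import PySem

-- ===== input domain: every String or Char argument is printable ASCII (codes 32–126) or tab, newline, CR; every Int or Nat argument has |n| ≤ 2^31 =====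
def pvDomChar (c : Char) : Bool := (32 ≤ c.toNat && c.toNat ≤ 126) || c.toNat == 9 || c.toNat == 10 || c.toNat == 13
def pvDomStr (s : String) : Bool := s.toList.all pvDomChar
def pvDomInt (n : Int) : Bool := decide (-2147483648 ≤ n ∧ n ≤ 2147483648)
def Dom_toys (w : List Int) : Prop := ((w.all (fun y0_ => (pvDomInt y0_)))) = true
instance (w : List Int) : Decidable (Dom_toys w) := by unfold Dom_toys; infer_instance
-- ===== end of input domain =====

-- B replaces A's while-loop with repeated slicing by one linear pass over the sorted list;
-- note A sorts its argument in place (w.sort()) — the equivalence here is about the return value only.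

-- ===== PORT A =====
-- the inner 'for j in w[i:]' loop: advances i past each j<=m, on the first j>m does count+=1 and breaks
def toysInner : List Int → Nat → Int → Int → Nat × Int
  | [], i, count, _ => (i, count)
  | j :: rest, i, count, m => if j ≤ m then toysInner rest (i + 1) count m else (i, count + 1)

theorem toysInner_fst_ge : ∀ (l : List Int) (i : Nat) (c m : Int), i ≤ (toysInner l i c m).1
  | [], _, _, _ => le_refl _
  | j :: rest, i, c, m => by
    simp only [toysInner]
    split
    · exact le_trans (Nat.le_succ i) (toysInner_fst_ge rest (i + 1) c m)
    · exact le_refl _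

-- the outer while(i<len(w)) loop; i stays a Nat index (Python's i starts at 0 and only increments),
-- the slice w[i:] is s.drop i (exact for 0 ≤ i)
def toysOuter (s : List Int) (i : Nat) (count : Int) : Int :=
  if h : i < s.length then
    toysOuter s (toysInner (s.drop i) i count (s[i] + 4)).1
                (toysInner (s.drop i) i count (s[i] + 4)).2
  else count
termination_by s.length - i
decreasing_by
  have h1 : i + 1 ≤ (toysInner (s.drop i) i count (s[i] + 4)).1 := by
    have hd : s.drop i = s[i] :: s.drop (i + 1) := List.drop_eq_getElem_cons h
    rw [hd, toysInner, if_pos (by omega : s[i] ≤ s[i] + 4)]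
    exact toysInner_fst_ge _ _ _ _
  omega

def toys (w : List Int) : Int :=
  toysOuter (PySem.List.sorted w (fun x => x) false) 0 0 + 1

-- ===== PORT B =====
-- B's loop body: 'if limit is None or x > limit: count += 1; limit = x + 4'
def toysAltStep (st : Int × Option Int) (x : Int) : Int × Option Int :=
  match st.2 with
  | none => (st.1 + 1, some (x + 4))
  | some l => if x > l then (st.1 + 1, some (x + 4)) else st

def toys_alt (w : List Int) : Int :=
  ((PySem.List.sorted w (fun x => x) false).foldl toysAltStep (0, none)).1

-- ===== PRECONDITION & SPEC =====
-- on the empty list A returns 1 (its unconditional count+1) while B returns 0,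
-- the intended number of containers for zero toys
def D_toys (w : List Int) : Prop := w = []
instance (w : List Int) : Decidable (D_toys w) := by unfold D_toys; infer_instance

def Spec_toys (w : List Int) (out : Int) : Prop := ¬ D_toys w → out = toys_alt w
instance (w : List Int) (out : Int) : Decidable (Spec_toys w out) := by unfold Spec_toys; infer_instance

def pvDiffWitness_toys : List Int := []
def pvDiffWitnessOut_toys : Int × Int := (1, 0)

-- ===== CLAIM (what is proved, stated in full; the proofs are below) =====
def Claim_unchanged_toys : Prop := ∀ (w : List Int), Dom_toys w → Spec_toys w (toys w)
def Claim_changed_toys : Prop := Dom_toys (pvDiffWitness_toys) ∧ D_toys (pvDiffWitness_toys) ∧ toys (pvDiffWitness_toys) = pvDiffWitnessOut_toys.1 ∧ toys_alt (pvDiffWitness_toys) = pvDiffWitnessOut_toys.2 ∧ pvDiffWitnessOut_toys.1 ≠ pvDiffWitnessOut_toys.2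
def Claim_exact_toys : Prop := ∀ (w : List Int), Dom_toys w → D_toys w → toys w ≠ toys_alt w

-- ===== LEMMAS AND PROOFS =====

-- the common greedy-count specification both loops compute
def gcount : List Int → Int
  | [] => 0
  | x :: rest => 1 + gcount (rest.dropWhile (fun y => y ≤ x + 4))
termination_by l => l.length
decreasing_by
  simp only [List.length_cons]
  exact Nat.lt_succ_of_le (List.length_dropWhile_le _ _)

theorem dropWhile_eq_drop (p : Int → Bool) : ∀ (l : List Int),
    l.dropWhile p = l.drop (l.takeWhile p).length
  | [] => rfl
  | x :: rest => by
    by_cases h : p x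
    · simp [List.takeWhile_cons, h, dropWhile_eq_drop p rest]
    · simp [List.takeWhile_cons, h]

-- characterisation of the inner loop by takeWhile
theorem toysInner_eq (m : Int) : ∀ (l : List Int) (i : Nat) (c : Int),
    toysInner l i c m =
      ((i + (l.takeWhile (fun y => y ≤ m)).length),
        if (l.takeWhile (fun y => y ≤ m)).length = l.length then c else c + 1)
  | [], i, c => by simp [toysInner]
  | x :: rest, i, c => by
    by_cases h : x ≤ m
    · have ih := toysInner_eq m rest (i + 1) c
      simp only [toysInner, ih, List.takeWhile_cons, decide_eq_true_eq, h,
        if_true, List.length_cons, Prod.mk.injEq]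
      refine ⟨by omega, ?_⟩
      by_cases hk : (rest.takeWhile (fun y => decide (y ≤ m))).length = rest.length
      · rw [if_pos hk, if_pos (by omega)]
      · rw [if_neg hk, if_neg (by omega)]
    · simp only [toysInner, List.takeWhile_cons, decide_eq_true_eq, h,
        if_false, List.length_nil, List.length_cons, Prod.mk.injEq]
      refine ⟨by omega, ?_⟩
      rw [if_neg (by omega)]

-- the outer loop computes gcount of the remaining suffix (minus the final container's break)
theorem toysOuter_eq (s : List Int) : ∀ (n i : Nat), s.length - i ≤ n → i < s.length →
    ∀ (c : Int), toysOuter s i c = c + gcount (s.drop i) - 1 := by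
  intro n
  induction n with
  | zero => intro i hn hi c; omega
  | succ n ih =>
    intro i hn hi c
    have hd : s.drop i = s[i] :: s.drop (i + 1) := List.drop_eq_getElem_cons hi
    rw [toysOuter, dif_pos hi, toysInner_eq]
    have htw : (s.drop i).takeWhile (fun y => y ≤ s[i] + 4)
        = s[i] :: (s.drop (i + 1)).takeWhile (fun y => y ≤ s[i] + 4) := by
      rw [hd, List.takeWhile_cons]
      simp
    set k := ((s.drop (i + 1)).takeWhile (fun y => y ≤ s[i] + 4)).length with hk
    have hkle : k ≤ (s.drop (i + 1)).length := (List.takeWhile_sublist _).length_le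
    have hlen1 : (s.drop i).length = s.length - i := List.length_drop ..
    have hlen2 : (s.drop (i + 1)).length = s.length - (i + 1) := List.length_drop ..
    have hgc : gcount (s.drop i)
        = 1 + gcount ((s.drop (i + 1)).drop k) := by
      rw [hd, gcount, dropWhile_eq_drop, ← hk]
    have hdd : (s.drop (i + 1)).drop k = s.drop (i + 1 + k) := by
      rw [List.drop_drop, Nat.add_comm]
    by_cases hall : ((s.drop i).takeWhile (fun y => y ≤ s[i] + 4)).length = (s.drop i).length
    · -- no break: the rest of the list fits into this container, the loop index jumps to the end
      rw [if_pos hall]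
      have hklen : i + ((s.drop i).takeWhile (fun y => y ≤ s[i] + 4)).length = s.length := by
        omega
      rw [hklen, toysOuter, dif_neg (by omega)]
      have : (s.drop (i + 1)).drop k = [] := by
        apply List.drop_eq_nil_of_le
        rw [htw, List.length_cons] at hall
        omega
      rw [hgc, this]
      simp [gcount]
    · -- break: a new container starts at index i + k + 1
      rw [if_neg hall]
      rw [htw, List.length_cons] at hall ⊢
      have hlt : i + (k + 1) < s.length := by omega
      rw [ih (i + (k + 1)) (by omega) hlt]
      rw [hgc, hdd]
      have : i + 1 + k = i + (k + 1) := by omega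
      rw [this]
      ring

-- B's fold with an active limit skips the prefix ≤ limit, then counts greedily
theorem foldlAlt_some : ∀ (l : List Int) (c lim : Int),
    (l.foldl toysAltStep (c, some lim)).1 = c + gcount (l.dropWhile (fun y => y ≤ lim)) := by
  intro l
  induction l with
  | nil => intro c lim; simp [gcount]
  | cons x rest ih =>
    intro c lim
    by_cases h : x > lim
    · rw [List.foldl_cons]
      show ((rest.foldl toysAltStep (toysAltStep (c, some lim) x))).1 = _
      rw [show toysAltStep (c, some lim) x = (c + 1, some (x + 4)) by
        simp [toysAltStep, h]]
      rw [ih, List.dropWhile_cons, if_neg (by simpa using h), gcount]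
      ring
    · rw [List.foldl_cons]
      rw [show toysAltStep (c, some lim) x = (c, some lim) by
        simp [toysAltStep, h]]
      rw [ih, List.dropWhile_cons, if_pos (by simpa using h)]

theorem foldlAlt_none : ∀ (l : List Int) (c : Int),
    (l.foldl toysAltStep (c, none)).1 = c + gcount l := by
  intro l c
  cases l with
  | nil => simp [gcount]
  | cons x rest =>
    rw [List.foldl_cons]
    rw [show toysAltStep (c, none) x = (c + 1, some (x + 4)) by simp [toysAltStep]]
    rw [foldlAlt_some, gcount]
    ring

theorem toys_eq_gcount (w : List Int) (hw : w ≠ []) :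
    toys w = gcount (PySem.List.sorted w (fun x => x) false) := by
  have hs : PySem.List.sorted w (fun x => x) false ≠ [] := by
    simpa [PySem.List.sorted_eq_nil_iff] using hw
  have hlen : 0 < (PySem.List.sorted w (fun x => x) false).length :=
    List.length_pos_iff.mpr hs
  rw [toys, toysOuter_eq _ (PySem.List.sorted w (fun x => x) false).length 0 (by omega) hlen,
    List.drop_zero]
  ring

theorem toys_alt_eq_gcount (w : List Int) :
    toys_alt w = gcount (PySem.List.sorted w (fun x => x) false) := by
  rw [toys_alt, foldlAlt_none]
  ring

theorem toys_empty : toys [] = 1 := by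
  rw [toys, show PySem.List.sorted ([] : List Int) (fun x => x) false = [] from rfl,
    toysOuter, dif_neg (by simp)]
  norm_num

-- ===== VERDICT (by name: the statement is the Claim_ definition above) =====
theorem toys_spec : Claim_unchanged_toys := by
  intro w _ hD
  rw [toys_eq_gcount w hD, toys_alt_eq_gcount]

theorem toys_changed : Claim_changed_toys := by
  unfold Claim_changed_toys
  refine ⟨by decide, rfl, toys_empty, by decide, by decide⟩

theorem toys_tight : Claim_exact_toys := by
  intro w _ hD
  subst hD
  rw [toys_empty]
  decide
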